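-- pv_equiv track=rewrite | github.com/baxkspace/algorithm-Xplosion | Programmers/기사단원의_무기/baxkspace/solution.py | solution
-- ===== SOURCE A (Python) =====
-- import math
--
-- def solution(number, limit, power):
--     answer = 0
--     for i in range(1, number + 1):
--         num = 0
--         for j in range(1, int(math.sqrt(i)) + 1):
--             if i % j == 0:
--                 num += 1
--                 if j * j != i:
--                     num += 1
--             if num > limit:
--                 break
--         if num <= limit:
--             answer += num
--         else:
--             answer += power
--
--     return answer
-- ===== SOURCE B (Python) =====
-- def solution(number, limit, power):
--     # Divisor-count sieve: counts[m] = number of divisors of m after the double loop.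
--     if number < 1:
--         return 0
--     counts = [0] * (number + 1)
--     for j in range(1, number + 1):
--         for m in range(j, number + 1, j):
--             counts[m] += 1
--     return sum(c if c <= limit else power for c in counts[1:])
-- ===== Notes on version B (the rewrite author's own statement) =====
-- stated objective: faster
-- what changed: A counts each i's divisors separately by trial division up to sqrt(i); B builds one divisor-count sieve (for each j, increment all multiples of j) and then applies the limit/power threshold to the counts.
import Mathlib
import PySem

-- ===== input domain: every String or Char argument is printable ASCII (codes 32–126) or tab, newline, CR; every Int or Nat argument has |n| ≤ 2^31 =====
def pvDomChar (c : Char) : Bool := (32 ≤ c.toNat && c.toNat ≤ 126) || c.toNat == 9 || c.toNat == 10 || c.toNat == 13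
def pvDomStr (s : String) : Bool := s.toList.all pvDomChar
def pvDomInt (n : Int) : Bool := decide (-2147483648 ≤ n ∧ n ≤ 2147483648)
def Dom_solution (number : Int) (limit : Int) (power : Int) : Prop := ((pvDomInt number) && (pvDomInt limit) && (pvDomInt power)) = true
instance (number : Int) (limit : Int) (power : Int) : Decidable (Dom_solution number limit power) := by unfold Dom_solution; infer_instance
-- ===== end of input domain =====

-- B replaces A's per-i trial division up to sqrt(i) by one divisor-count sieve over all i, then applies the limit/power threshold; measurably faster.

-- ===== PORT A =====
-- body of A's inner loop for one j: `if i % j == 0: num += 1; if j*j != i: num += 1`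
def pvInnerStep (i : Int) (num : Int) (j : Int) : Int :=
  if PySem.Int.mod i j = 0 then
    let num := num + 1
    if j * j ≠ i then num + 1 else num
  else num

-- A's inner `for j in range(1, int(math.sqrt(i)) + 1)` with the early `break` once num > limit
def pvInnerA (i limit : Int) : List Int → Int → Int
  | [], num => num
  | j :: js, num =>
    let num := pvInnerStep i num j
    if num > limit then num else pvInnerA i limit js num

def solution (number : Int) (limit : Int) (power : Int) : Int :=
  (PySem.List.pyRange 1 (number + 1) 1).foldl
    (fun answer i =>
      -- int(math.sqrt(i)) = Nat.sqrt i.toNat: exact on the domain (1 ≤ i ≤ 2^31, where the C double sqrt rounds to the true isqrt)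
      let num := pvInnerA i limit (PySem.List.pyRange 1 ((i.toNat.sqrt : Int) + 1) 1) 0
      if num ≤ limit then answer + num else answer + power)
    0

-- ===== PORT B =====
def solution_alt (number : Int) (limit : Int) (power : Int) : Int :=
  if number < 1 then 0
  else
    let counts : List Int := List.replicate (number + 1).toNat 0
    let counts :=
      (PySem.List.pyRange 1 (number + 1) 1).foldl
        (fun counts j =>
          (PySem.List.pyRange j (number + 1) j).foldl
            (fun counts m => counts.modify m.toNat (· + 1)) counts)
        counts
    ((counts.drop 1).map (fun c => if c ≤ limit then c else power)).sum

-- ===== PRECONDITION & SPEC =====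
def Spec_solution (number : Int) (limit : Int) (power : Int) (out : Int) : Prop := out = solution_alt number limit power
instance (number : Int) (limit : Int) (power : Int) (out : Int) : Decidable (Spec_solution number limit power out) := by unfold Spec_solution; infer_instance

-- ===== CLAIM (what is proved, stated in full; the proofs are below) =====
def Claim_equal_solution : Prop := ∀ (number : Int) (limit : Int) (power : Int), Dom_solution number limit power → Spec_solution number limit power (solution number limit power)

-- ===== LEMMAS AND PROOFS =====

-- weight one j contributes to A's divisor count for i
def pvW (i j : Int) : Int := if PySem.Int.mod i j = 0 then (if j * j ≠ i then 2 else 1) else 0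

-- A's inner loop without the break
def pvG (i : Int) (js : List Int) (num : Int) : Int := js.foldl (pvInnerStep i) num

def pvBody (limit power d : Int) : Int := if d ≤ limit then d else power

def pvDC (t : Nat) : Int := (t.divisors.card : Int)

def pvNatW (m j : Nat) : Nat := if j ∣ m then (if j * j ≠ m then 2 else 1) else 0

theorem pvInnerStep_eq (i num j : Int) : pvInnerStep i num j = num + pvW i j := by
  simp only [pvInnerStep, pvW]
  split_ifs <;> omega

theorem pvW_nonneg (i j : Int) : 0 ≤ pvW i j := by
  simp only [pvW]; split_ifs <;> omega

theorem pvG_eq (i : Int) (js : List Int) (num : Int) :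
    pvG i js num = num + (js.map (pvW i)).sum := by
  have h : ∀ (js : List Int) (num : Int), js.foldl (pvInnerStep i) num = num + (js.map (pvW i)).sum := by
    intro js
    induction js with
    | nil => intro num; simp
    | cons j js ih =>
      intro num
      simp only [List.foldl_cons, List.map_cons, List.sum_cons, ih, pvInnerStep_eq]
      ring
  exact h js num

theorem pvG_ge (i : Int) (js : List Int) (num : Int) : num ≤ pvG i js num := by
  rw [pvG_eq]
  have : 0 ≤ (js.map (pvW i)).sum := List.sum_nonneg (by
    intro x hx
    obtain ⟨j, _, rfl⟩ := List.mem_map.mp hx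
    exact pvW_nonneg i j)
  omega

theorem pvInnerA_classify (i limit : Int) :
    ∀ (js : List Int) (num : Int),
      pvInnerA i limit js num = pvG i js num ∨
        (limit < pvInnerA i limit js num ∧ limit < pvG i js num) := by
  intro js
  induction js with
  | nil => intro num; left; rfl
  | cons j js ih =>
    intro num
    simp only [pvInnerA]
    by_cases h : pvInnerStep i num j > limit
    · right
      refine ⟨by simp [h], ?_⟩
      have := pvG_ge i js (pvInnerStep i num j)
      simp only [pvG, List.foldl_cons]
      calc limit < pvInnerStep i num j := h
        _ ≤ _ := pvG_ge i js _
    · simp only [if_neg h]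
      have : pvG i (j :: js) num = pvG i js (pvInnerStep i num j) := by
        simp [pvG]
      rw [this]
      exact ih (pvInnerStep i num j)

theorem pvBody_innerA (i limit power : Int) (js : List Int) (num : Int) :
    pvBody limit power (pvInnerA i limit js num) = pvBody limit power (pvG i js num) := by
  rcases pvInnerA_classify i limit js num with h | ⟨h1, h2⟩
  · rw [h]
  · simp [pvBody]
    rw [if_neg (by omega), if_neg (by omega)]

-- sqrt pairing: summing pvNatW over 1..sqrt m counts all divisors of m
theorem pv_sqrt_sum (m : Nat) (hm : 0 < m) :
    ∑ j ∈ Finset.Ico 1 (m.sqrt + 1), pvNatW m j = m.divisors.card := by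
  classical
  set s := m.sqrt with hs
  set S : Finset Nat := (Finset.Ico 1 (s + 1)).filter (· ∣ m) with hS
  have step1 : ∑ j ∈ Finset.Ico 1 (s + 1), pvNatW m j
      = ∑ j ∈ S, (if j * j ≠ m then 2 else 1) := by
    rw [hS, Finset.sum_filter]
    unfold pvNatW
    rfl
  have step2 : ∑ j ∈ S, (if j * j ≠ m then (2:Nat) else 1)
      = S.card + (S.filter (fun j => j * j ≠ m)).card := by
    have : ∀ j ∈ S, (if j * j ≠ m then (2:Nat) else 1) = 1 + (if j * j ≠ m then 1 else 0) := by
      intro j _; split_ifs <;> rfl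
    rw [Finset.sum_congr rfl this, Finset.sum_add_distrib]
    simp [Finset.card_filter]
  have claim1 : m.divisors.filter (fun j => j * j ≤ m) = S := by
    ext j
    simp only [Finset.mem_filter, Nat.mem_divisors, hS, Finset.mem_Ico]
    constructor
    · rintro ⟨⟨hd, hm0⟩, hle⟩
      have hj1 : 0 < j := Nat.pos_of_dvd_of_pos hd hm
      have : j ≤ s := Nat.le_sqrt.mpr hle
      exact ⟨⟨hj1, by omega⟩, hd⟩
    · rintro ⟨⟨hj1, hjs⟩, hd⟩
      exact ⟨⟨hd, by omega⟩, Nat.le_sqrt.mp (by omega)⟩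
  have claim2 : (m.divisors.filter (fun j => ¬ j * j ≤ m)).card
      = (S.filter (fun j => j * j ≠ m)).card := by
    apply Finset.card_nbij' (fun j => m / j) (fun j => m / j)
    · rintro j hj
      simp only [Finset.mem_coe, Finset.mem_filter, Nat.mem_divisors] at hj
      obtain ⟨⟨hd, hm0⟩, hgt⟩ := hj
      have hj0 : 0 < j := Nat.pos_of_dvd_of_pos hd hm
      obtain ⟨c, hc⟩ := hd
      have hcq : m / j = c := by rw [hc, Nat.mul_div_cancel_left _ hj0]
      have hc0 : 0 < c := by
        rcases Nat.eq_zero_or_pos c with h | h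
        · subst h; omega
        · exact h
      have hcj : c < j := by nlinarith
      have hcc : c * c < m := by nlinarith
      simp only [Finset.mem_coe, Finset.mem_filter, hS, Finset.mem_Ico, hcq]
      refine ⟨⟨⟨hc0, ?_⟩, ⟨j, by rw [hc, Nat.mul_comm]⟩⟩, by omega⟩
      have : c ≤ s := Nat.le_sqrt.mpr (by omega)
      omega
    · rintro j hj
      simp only [Finset.mem_coe, Finset.mem_filter, hS, Finset.mem_Ico] at hj
      obtain ⟨⟨⟨hj1, hjs⟩, hd⟩, hne⟩ := hj
      have hj0 : 0 < j := by omega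
      obtain ⟨c, hc⟩ := hd
      have hcq : m / j = c := by rw [hc, Nat.mul_div_cancel_left _ hj0]
      have hjj : j * j ≤ m := Nat.le_sqrt.mp (by omega)
      have hjj' : j * j < m := by omega
      have hc0 : 0 < c := by
        rcases Nat.eq_zero_or_pos c with h | h
        · subst h; omega
        · exact h
      have hjc : j < c := by nlinarith
      have hcc : m < c * c := by nlinarith
      simp only [Finset.mem_coe, Finset.mem_filter, Nat.mem_divisors, hcq]
      exact ⟨⟨⟨j, by rw [hc, Nat.mul_comm]⟩, by omega⟩, by omega⟩
    · rintro j hj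
      simp only [Finset.mem_coe, Finset.mem_filter, Nat.mem_divisors] at hj
      exact Nat.div_div_self hj.1.1 hj.1.2
    · rintro j hj
      simp only [Finset.mem_coe, Finset.mem_filter, hS, Finset.mem_Ico] at hj
      exact Nat.div_div_self hj.1.2 (by omega)
  have hsplit := Finset.card_filter_add_card_filter_not (s := m.divisors) (fun j => j * j ≤ m)
  have c1 : (m.divisors.filter (fun j => j * j ≤ m)).card = S.card := by rw [claim1]
  rw [step1, step2]
  omega

theorem pvW_cast (m j : Nat) : pvW (m : Int) (j : Int) = (pvNatW m j : Int) := by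
  simp only [pvW, pvNatW, PySem.Int.mod_eq_zero_iff_dvd, Int.natCast_dvd_natCast]
  have h2 : ((j : Int) * (j : Int) ≠ (m : Int)) ↔ (j * j ≠ m) := by
    constructor <;> intro h hc <;> apply h <;> exact_mod_cast hc
  by_cases hd : j ∣ m
  · by_cases he : j * j = m
    · have he' : (j : Int) * (j : Int) = (m : Int) := by exact_mod_cast he
      simp [hd, he, he']
    · simp [hd, he, h2.mpr he]
  · simp [hd]

theorem pv_pyRange_sum (s : Nat) (f : Int → Int) :
    ((PySem.List.pyRange 1 ((s : Int) + 1) 1).map f).sum = ∑ k ∈ Finset.range s, f (1 + (k : Int)) := by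
  rw [PySem.List.pyRange_one]
  have h1 : ((s : Int) + 1 - 1).toNat = s := by omega
  rw [h1, List.map_map]
  rfl

-- the value A's inner loop computes, for i = m ≥ 1
theorem pvA_cell (m : Nat) (hm : 0 < m) :
    pvG ((m : Nat) : Int) (PySem.List.pyRange 1 ((((m : Nat) : Int).toNat.sqrt : Int) + 1) 1) 0 = pvDC m := by
  have htn : ((m : Int)).toNat = m := Int.toNat_natCast m
  rw [pvG_eq, htn, zero_add, pv_pyRange_sum]
  have hcell : ∀ k : Nat, pvW (m : Int) (1 + (k : Int)) = (pvNatW m (1 + k) : Int) := by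
    intro k
    have h : (1 + (k : Int)) = ((1 + k : Nat) : Int) := by push_cast; ring
    rw [h, pvW_cast]
  calc ∑ k ∈ Finset.range m.sqrt, pvW (m : Int) (1 + (k : Int))
      = ∑ k ∈ Finset.range m.sqrt, (pvNatW m (1 + k) : Int) :=
        Finset.sum_congr rfl (fun k _ => hcell k)
    _ = ((∑ k ∈ Finset.range m.sqrt, pvNatW m (1 + k) : Nat) : Int) := by push_cast; rfl
    _ = ((∑ j ∈ Finset.Ico 1 (m.sqrt + 1), pvNatW m j : Nat) : Int) := by
        rw [Finset.sum_Ico_eq_sum_range]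
        norm_num
    _ = pvDC m := by rw [pv_sqrt_sum m hm]; rfl

theorem pv_count_flatMap (t : Nat) (l : List Int) (f : Int → List Nat) :
    (l.flatMap f).count t = (l.map (fun x => (f x).count t)).sum := by
  induction l with
  | nil => simp
  | cons x l ih => simp [List.flatMap_cons, List.count_append, ih]

theorem pv_foldl_foldl {α β : Type} (f : β → List α) (g : List Int → α → List Int) :
    ∀ (js : List β) (c : List Int),
      js.foldl (fun c j => (f j).foldl g c) c = (js.flatMap f).foldl g c := by
  intro js
  induction js with
  | nil => intro c; simp
  | cons j js ih => intro c; simp [List.flatMap_cons, List.foldl_append, ih]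

theorem pv_modify_fold_get :
    ∀ (L : List Nat) (c : List Int) (t : Nat),
      GetElem?.getElem? (L.foldl (fun c k => c.modify k (· + 1)) c) t =
        (GetElem?.getElem? c t).map (· + (L.count t : Int)) := by
  intro L
  induction L with
  | nil => intro c t; cases h : (GetElem?.getElem? c t) <;> simp [h]
  | cons k L ih =>
    intro c t
    simp only [List.foldl_cons, ih, List.getElem?_modify, List.count_cons]
    cases h : (GetElem?.getElem? c t) with
    | none => simp [h]
    | some v =>
      by_cases hk : k = t
      · subst hk; simp [h]
        ring
      · simp [h, hk]

theorem pv_inner_count (N j : Int) (h1 : 1 ≤ j) (t : Nat) (ht : 1 ≤ t) (htN : (t : Int) ≤ N) :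
    ((PySem.List.pyRange j (N + 1) j).map Int.toNat).count t =
      if j ∣ (t : Int) ∧ j ≤ (t : Int) then 1 else 0 := by
  have hj0 : 0 < j := by omega
  have hmem : t ∈ (PySem.List.pyRange j (N + 1) j).map Int.toNat ↔
      (j ∣ (t : Int) ∧ j ≤ (t : Int)) := by
    rw [List.mem_map]
    constructor
    · rintro ⟨x, hx, hxt⟩
      obtain ⟨hle, hlt, hdv⟩ := (PySem.List.mem_pyRange_iff_of_pos hj0 x).mp hx
      have hx0 : 0 ≤ x := by omega
      have hxt' : x = (t : Int) := by omega
      subst hxt'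
      have : j ∣ (t : Int) - j + j := dvd_add hdv dvd_rfl
      refine ⟨by simpa using this, hle⟩
    · rintro ⟨hd, hle⟩
      refine ⟨(t : Int), (PySem.List.mem_pyRange_iff_of_pos hj0 _).mpr
        ⟨hle, by omega, dvd_sub hd dvd_rfl⟩, by omega⟩
  have hnodup : ((PySem.List.pyRange j (N + 1) j).map Int.toNat).Nodup := by
    rw [PySem.List.pyRange_of_pos _ _ hj0, List.map_map]
    apply List.Nodup.map _ List.nodup_range
    intro k1 k2 hk
    simp only [Function.comp_apply] at hk
    have h1 : (0:Int) ≤ j + j * (k1 : Int) := by positivity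
    have h2 : (0:Int) ≤ j + j * (k2 : Int) := by positivity
    have : j + j * (k1 : Int) = j + j * (k2 : Int) := by omega
    have : j * (k1 : Int) = j * (k2 : Int) := by omega
    have : (k1 : Int) = (k2 : Int) := mul_left_cancel₀ (by omega) this
    exact_mod_cast this
  by_cases hc : j ∣ (t : Int) ∧ j ≤ (t : Int)
  · rw [if_pos hc]
    exact List.count_eq_one_of_mem hnodup (hmem.mpr hc)
  · rw [if_neg hc]
    exact List.count_eq_zero_of_not_mem (fun hmem' => hc (hmem.mp hmem'))

theorem pv_total_count (N : Int) (t : Nat) (ht : 1 ≤ t) (htN : (t : Int) ≤ N) :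
    (((PySem.List.pyRange 1 (N + 1) 1).flatMap
        (fun j => (PySem.List.pyRange j (N + 1) j).map Int.toNat)).count t) = t.divisors.card := by
  rw [pv_count_flatMap]
  rw [PySem.List.pyRange_one_append 1 ((t : Int) + 1) (N + 1) (by omega) (by omega)]
  rw [List.map_append, List.sum_append]
  have hsecond : ((PySem.List.pyRange ((t : Int) + 1) (N + 1) 1).map
      (fun j => ((PySem.List.pyRange j (N + 1) j).map Int.toNat).count t)).sum = 0 := by
    apply List.sum_eq_zero
    intro x hx
    obtain ⟨jj, hj, rfl⟩ := List.mem_map.mp hx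
    obtain ⟨hle, _⟩ := PySem.List.mem_pyRange_one.mp hj
    rw [pv_inner_count N jj (by omega) t ht htN, if_neg (by omega)]
  rw [hsecond, Nat.add_zero]
  have hfirst : ((PySem.List.pyRange 1 ((t : Int) + 1) 1).map
      (fun j => ((PySem.List.pyRange j (N + 1) j).map Int.toNat).count t)).sum
      = ((PySem.List.pyRange 1 ((t : Int) + 1) 1).map
          (fun j => if j ∣ (t : Int) ∧ j ≤ (t : Int) then 1 else 0)).sum := by
    congr 1
    apply List.map_congr_left
    intro jj hj
    obtain ⟨h1j, h2j⟩ := PySem.List.mem_pyRange_one.mp hj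
    exact pv_inner_count N jj (by omega) t ht htN
  rw [hfirst, PySem.List.pyRange_one]
  have h1 : ((t : Int) + 1 - 1).toNat = t := by omega
  rw [h1, List.map_map]
  have hlist : ((List.range t).map
      ((fun j => if j ∣ (t : Int) ∧ j ≤ (t : Int) then 1 else 0) ∘ fun k : Nat => 1 + (k : Int))).sum
      = ∑ k ∈ Finset.range t, (if (1 + k) ∣ t then 1 else 0) := by
    show (∑ k ∈ Finset.range t, if (1 + (k : Int)) ∣ (t : Int) ∧ (1 + (k : Int)) ≤ (t : Int) then 1 else 0) = _
    apply Finset.sum_congr rfl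
    intro k hk
    have hk' : k < t := Finset.mem_range.mp hk
    have hdv : ((1 + (k : Int)) ∣ (t : Int)) ↔ ((1 + k) ∣ t) := by
      have : (1 + (k : Int)) = ((1 + k : Nat) : Int) := by push_cast; ring
      rw [this, Int.natCast_dvd_natCast]
    by_cases hd : (1 + k) ∣ t
    · rw [if_pos ⟨hdv.mpr hd, by omega⟩, if_pos hd]
    · rw [if_neg (fun hcc => hd (hdv.mp hcc.1)), if_neg hd]
  rw [hlist]
  have hdiv : t.divisors = Finset.filter (· ∣ t) (Finset.Ico 1 (t + 1)) := rfl
  rw [hdiv, Finset.card_filter, Finset.sum_Ico_eq_sum_range]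
  norm_num

theorem pv_main (number limit power : Int) : solution number limit power = solution_alt number limit power := by
  by_cases hN : number < 1
  · have hnil : PySem.List.pyRange 1 (number + 1) 1 = [] := PySem.List.pyRange_one_eq_nil (by omega)
    simp [solution, solution_alt, hnil, if_pos hN]
  · rw [not_lt] at hN
    have hNcast : ((number.toNat : Nat) : Int) = number := Int.toNat_of_nonneg (by omega)
    set Nn := number.toNat with hNn
    -- ===== A side =====
    have hbody : (fun (answer i : Int) =>
        let num := pvInnerA i limit (PySem.List.pyRange 1 ((i.toNat.sqrt : Int) + 1) 1) 0
        if num ≤ limit then answer + num else answer + power)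
        = fun answer i => answer +
            pvBody limit power (pvInnerA i limit (PySem.List.pyRange 1 ((i.toNat.sqrt : Int) + 1) 1) 0) := by
      funext a i
      simp only [pvBody]
      split_ifs <;> rfl
    have hA2 : solution number limit power
        = ((PySem.List.pyRange 1 (number + 1) 1).map (fun i => pvBody limit power (pvDC i.toNat))).sum := by
      unfold solution
      rw [hbody, PySem.List.foldl_add, zero_add]
      congr 1
      apply List.map_congr_left
      intro i hi
      obtain ⟨h1i, h2i⟩ := PySem.List.mem_pyRange_one.mp hi
      obtain ⟨m, rfl⟩ : ∃ m : Nat, i = (m : Int) := ⟨i.toNat, (Int.toNat_of_nonneg (by omega)).symm⟩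
      have hm : 0 < m := by exact_mod_cast h1i
      rw [pvBody_innerA, pvA_cell m hm, Int.toNat_natCast]
    have hA3 : solution number limit power
        = ∑ k ∈ Finset.range Nn, pvBody limit power (pvDC (k + 1)) := by
      rw [hA2]
      have hone : number + 1 = ((Nn : Int)) + 1 := by rw [hNcast]
      rw [hone, pv_pyRange_sum]
      apply Finset.sum_congr rfl
      intro k _
      congr 1
      have : (1 + (k : Int)).toNat = k + 1 := by omega
      rw [this]
    -- ===== B side =====
    have hrep : (number + 1).toNat = Nn + 1 := by omega
    have hB : solution_alt number limit power
        = ∑ k ∈ Finset.range Nn, pvBody limit power (pvDC (k + 1)) := by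
      unfold solution_alt
      rw [if_neg (by omega)]
      simp only [hrep]
      rw [pv_foldl_foldl (fun j => PySem.List.pyRange j (number + 1) j)
            (fun c m => c.modify m.toNat (· + 1))]
      have hfold : ((PySem.List.pyRange 1 (number + 1) 1).flatMap
            (fun j => PySem.List.pyRange j (number + 1) j)).foldl
            (fun c m => c.modify m.toNat (· + 1)) (List.replicate (Nn + 1) (0 : Int))
          = (((PySem.List.pyRange 1 (number + 1) 1).flatMap
              (fun j => (PySem.List.pyRange j (number + 1) j).map Int.toNat))).foldl
              (fun c k => c.modify k (· + 1)) (List.replicate (Nn + 1) (0 : Int)) := by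
        rw [← List.map_flatMap, List.foldl_map]
      rw [hfold]
      set bigL := ((PySem.List.pyRange 1 (number + 1) 1).flatMap
          (fun j => (PySem.List.pyRange j (number + 1) j).map Int.toNat)) with hbigL
      have hcounts : bigL.foldl (fun c k => c.modify k (· + 1)) (List.replicate (Nn + 1) (0 : Int))
          = (List.range (Nn + 1)).map (fun t => ((bigL.count t : Nat) : Int)) := by
        apply List.ext_getElem?
        intro t
        rw [pv_modify_fold_get]
        by_cases h : t < Nn + 1
        · simp [h]
        · simp [h]
      rw [hcounts, List.range_succ_eq_map, List.map_cons, List.drop_one, List.tail_cons,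
        List.map_map, List.map_map]
      show ((List.range Nn).map ((fun c => if c ≤ limit then c else power) ∘
        ((fun t => ((bigL.count t : Nat) : Int)) ∘ Nat.succ))).sum = _
      have : ∀ k ∈ List.range Nn,
          ((fun c => if c ≤ limit then c else power) ∘
            ((fun t => ((bigL.count t : Nat) : Int)) ∘ Nat.succ)) k
          = pvBody limit power (pvDC (k + 1)) := by
        intro k hk
        have hk' : k < Nn := List.mem_range.mp hk
        have hcount : bigL.count (k + 1) = (k + 1).divisors.card := by
          rw [hbigL]
          exact pv_total_count number (k + 1) (by omega) (by omega)
        simp only [Function.comp_apply, Nat.succ_eq_add_one, hcount]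
        rfl
      rw [List.map_congr_left this]
      rfl
    rw [hA3, hB]

-- ===== VERDICT (by name: the statement is the Claim_ definition above) =====
theorem solution_spec : Claim_equal_solution := by
  intro number limit power _
  unfold Spec_solution
  exact pv_main number limit power
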